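-- pv_equiv track=rewrite | github.com/SWHL/PunctuationAcademy | utils.py | build_display_text
-- ===== SOURCE A (Python) =====
-- BLANK_PLACEHOLDER = "___"
--
-- def build_display_text(text: str, blanks: list) -> str:
--     """根据 text 和 blanks 生成带空位的展示文本，空位用下划线 ___ 表示。"""
--     if not blanks:
--         return text
--     blank_positions = {b["pos"] for b in blanks}
--     result = []
--     i = 0
--     while i < len(text):
--         if i in blank_positions:
--             result.append(BLANK_PLACEHOLDER)
--             i += 1
--         else:
--             result.append(text[i])
--             i += 1
--     return "".join(result)
-- ===== SOURCE B (Python) =====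
-- BLANK_PLACEHOLDER = "___"
--
-- def build_display_text(text: str, blanks: list) -> str:
--     chars = list(text)
--     for b in blanks:
--         p = b["pos"]
--         if 0 <= p < len(text):
--             chars[p] = BLANK_PLACEHOLDER
--     return "".join(chars)
-- ===== Notes on version B (the rewrite author's own statement) =====
-- stated objective: idiomatic
-- what changed: Instead of scanning every character of text with a set-membership test, B makes a mutable list of the characters and patches only the in-range blank positions in place while iterating the blanks, then joins.
import Mathlib
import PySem

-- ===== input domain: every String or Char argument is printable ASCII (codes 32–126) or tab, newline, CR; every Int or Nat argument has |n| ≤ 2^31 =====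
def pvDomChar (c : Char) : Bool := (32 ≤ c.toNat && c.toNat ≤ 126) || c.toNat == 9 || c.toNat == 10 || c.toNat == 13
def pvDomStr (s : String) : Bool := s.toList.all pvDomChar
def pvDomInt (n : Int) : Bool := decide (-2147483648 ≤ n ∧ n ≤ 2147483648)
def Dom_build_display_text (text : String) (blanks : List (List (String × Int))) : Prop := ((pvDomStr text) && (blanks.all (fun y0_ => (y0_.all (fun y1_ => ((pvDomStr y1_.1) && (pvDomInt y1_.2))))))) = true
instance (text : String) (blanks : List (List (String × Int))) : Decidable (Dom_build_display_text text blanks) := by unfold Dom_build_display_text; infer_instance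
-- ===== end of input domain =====

-- B patches a mutable char list in place by iterating the blanks (in-range guard) instead of scanning
-- every character of text with a set-membership test; same result, same cost, more idiomatic.


-- ===== PORT A =====
def BLANK_PLACEHOLDER : String := "___"

-- b["pos"] raises KeyError when the key is missing; Pre_ excludes that, the .getD 0 is unreachable inside Pre_
def build_display_text (text : String) (blanks : List (List (String × Int))) : String :=
  if blanks = [] then text
  else
    let blank_positions : PySem.Set Int :=
      PySem.Set.ofList (blanks.map (fun b => (PySem.Dict.get? ⟨b⟩ "pos").getD 0))
    let result : List String :=
      (PySem.List.pyRange 0 (PySem.Str.len text) 1).foldl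
        (fun result i =>
          if PySem.Set.contains blank_positions i then result ++ [BLANK_PLACEHOLDER]
          else result ++ [String.ofList [(PySem.Str.pyGet? text i).getD ' ']]) []
    PySem.Str.join "" result

-- ===== PORT B =====
def build_display_text_alt (text : String) (blanks : List (List (String × Int))) : String :=
  let chars0 : List String := text.toList.map (fun c => String.ofList [c])
  let chars : List String :=
    blanks.foldl
      (fun chars b =>
        let p : Int := (PySem.Dict.get? ⟨b⟩ "pos").getD 0
        if 0 ≤ p ∧ p < PySem.Str.len text then chars.set p.toNat BLANK_PLACEHOLDER else chars)
      chars0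
  PySem.Str.join "" chars

-- ===== PRECONDITION & SPEC =====
-- Pre_: every blank dict has a "pos" key; otherwise both Pythons raise KeyError.
def Pre_build_display_text (_text : String) (blanks : List (List (String × Int))) : Prop :=
  ∀ b ∈ blanks, (PySem.Dict.get? (⟨b⟩ : PySem.Dict String Int) "pos").isSome = true
instance (text : String) (blanks : List (List (String × Int))) : Decidable (Pre_build_display_text text blanks) := by unfold Pre_build_display_text; infer_instance
def pvWitness_build_display_text : String × (List (List (String × Int))) := ("hello", [[("pos", 1)], [("pos", 7)]])

def Spec_build_display_text (text : String) (blanks : List (List (String × Int))) (out : String) : Prop := out = build_display_text_alt text blanks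
instance (text : String) (blanks : List (List (String × Int))) (out : String) : Decidable (Spec_build_display_text text blanks out) := by unfold Spec_build_display_text; infer_instance

-- ===== CLAIM (what is proved, stated in full; the proofs are below) =====
def Claim_equal_build_display_text : Prop := ∀ (text : String) (blanks : List (List (String × Int))), Dom_build_display_text text blanks → Pre_build_display_text text blanks → Spec_build_display_text text blanks (build_display_text text blanks)

-- ===== LEMMAS AND PROOFS =====

-- characterization of B's patch loop, elementwise
lemma bfold_getElem? (L : Int) (bs : List (List (String × Int))) (cs : List String)
    (i : Nat) (hi : (i : Int) < L) :
    (bs.foldl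
      (fun chars b =>
        let p : Int := (PySem.Dict.get? ⟨b⟩ "pos").getD 0
        if 0 ≤ p ∧ p < L then chars.set p.toNat BLANK_PLACEHOLDER else chars)
      cs)[i]? =
    if ∃ b ∈ bs, (PySem.Dict.get? (⟨b⟩ : PySem.Dict String Int) "pos").getD 0 = (i : Int)
    then if i < cs.length then some BLANK_PLACEHOLDER else none
    else cs[i]? := by
  induction bs generalizing cs with
  | nil => simp
  | cons b bs ih =>
    simp only [List.foldl_cons, List.exists_mem_cons_iff]
    rw [ih]
    set p : Int := (PySem.Dict.get? (⟨b⟩ : PySem.Dict String Int) "pos").getD 0 with hp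
    by_cases hE : ∃ b' ∈ bs, (PySem.Dict.get? (⟨b'⟩ : PySem.Dict String Int) "pos").getD 0 = (i : Int)
    · simp only [hE, or_true, if_pos]
      split_ifs <;> simp_all [List.length_set]
    · simp only [hE, if_false, or_false]
      by_cases hr : 0 ≤ p ∧ p < L
      · simp only [if_pos hr, List.getElem?_set]
        by_cases hpi : p = (i : Int)
        · simp [hpi]
        · have h1 : p.toNat ≠ i := by omega
          simp [h1, hpi]
      · have hpi : ¬ p = (i : Int) := by
          intro h; exact hr ⟨by omega, by omega⟩
        simp [if_neg hr, hpi]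

lemma join_empty_eq (parts : List String) (cs : List Char)
    (h : parts = cs.map (fun c => String.ofList [c])) :
    PySem.Str.join "" parts = String.ofList cs := by
  apply String.toList_inj.mp
  rw [PySem.Str.toList_join, h]
  simp only [List.map_map]
  have : (String.toList ∘ fun c => String.ofList [c]) = (fun c => [c]) := by
    funext c; simp
  rw [this]
  simp [PySem.Chars.join_nil_singletons cs]

lemma bfold_length (L : Int) (bs : List (List (String × Int))) (cs : List String) :
    (bs.foldl
      (fun chars b =>
        let p : Int := (PySem.Dict.get? ⟨b⟩ "pos").getD 0
        if 0 ≤ p ∧ p < L then chars.set p.toNat BLANK_PLACEHOLDER else chars)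
      cs).length = cs.length := by
  induction bs generalizing cs with
  | nil => rfl
  | cons b bs ih =>
    simp only [List.foldl_cons]
    rw [ih]
    split_ifs <;> simp

lemma foldl_append_ite {α β : Type} (p : α → Bool) (f g : α → β) (l : List α) (acc : List β) :
    l.foldl (fun acc x => if p x = true then acc ++ [f x] else acc ++ [g x]) acc =
      acc ++ l.map (fun x => if p x = true then f x else g x) := by
  induction l generalizing acc with
  | nil => simp
  | cons x l ih => simp only [List.foldl_cons, List.map_cons]; split_ifs <;> simp [ih]

-- ===== VERDICT (by name: the statement is the Claim_ definition above) =====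
theorem build_display_text_spec : Claim_equal_build_display_text := by
  intro text blanks _ _
  unfold Spec_build_display_text build_display_text build_display_text_alt
  dsimp only
  by_cases hb : blanks = []
  · subst hb
    simp only [List.foldl_nil]
    rw [join_empty_eq _ text.toList rfl]
    exact (String.toList_inj.mp (by simp)).symm
  · rw [if_neg hb]
    rw [foldl_append_ite, List.nil_append]
    congr 1
    set m := text.toList.length with hm
    have hlen : PySem.Str.len text = (m : Int) := PySem.Str.len_eq text
    apply List.ext_getElem?
    intro i
    by_cases him : i < m
    · have hi : (i : Int) < PySem.Str.len text := by rw [hlen]; exact_mod_cast him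
      rw [bfold_getElem? _ _ _ _ hi]
      have hL : i < (PySem.List.pyRange 0 (PySem.Str.len text) 1).length := by
        rw [PySem.List.length_pyRange_one, hlen]; omega
      rw [List.getElem?_map, List.getElem?_eq_getElem hL, PySem.List.getElem_pyRange_one]
      have hc0 : (text.toList.map (fun c => String.ofList [c])).length = m := by rw [List.length_map]
      have hget : (text.toList.map (fun c => String.ofList [c]))[i]? =
          some (String.ofList [text.toList[i]]) := by
        rw [List.getElem?_eq_getElem (by rw [List.length_map]; exact him)]
        simp
      by_cases hEx : ∃ b ∈ blanks, (PySem.Dict.get? (⟨b⟩ : PySem.Dict String Int) "pos").getD 0 = (i : Int)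
      · have hcon : PySem.Set.contains
            (PySem.Set.ofList (blanks.map (fun b => (PySem.Dict.get? (⟨b⟩ : PySem.Dict String Int) "pos").getD 0)))
            ((0 : Int) + i) = true := by
          rw [PySem.Set.contains_iff, PySem.Set.mem_ofList, List.mem_map]
          obtain ⟨b, hbmem, hbeq⟩ := hEx
          exact ⟨b, hbmem, by simpa using hbeq⟩
        simp [hEx, him, hc0]
      · have hcon : PySem.Set.contains
            (PySem.Set.ofList (blanks.map (fun b => (PySem.Dict.get? (⟨b⟩ : PySem.Dict String Int) "pos").getD 0)))
            ((0 : Int) + i) = false := by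
          rw [Bool.eq_false_iff]
          intro h
          rw [PySem.Set.contains_iff, PySem.Set.mem_ofList, List.mem_map] at h
          obtain ⟨b, hbmem, hbeq⟩ := h
          exact hEx ⟨b, hbmem, by simpa using hbeq⟩
        have hpg : PySem.Str.pyGet? text ((0 : Int) + i) = some text.toList[i] := by
          rw [PySem.Str.pyGet?_eq]
          simp [PySem.Chars.pyGet?]
        simp [hEx, hget, List.getElem?_eq_getElem him]
    · have h1 : ((PySem.List.pyRange 0 (PySem.Str.len text) 1).map
          (fun i => if PySem.Set.contains
              (PySem.Set.ofList (blanks.map (fun b => (PySem.Dict.get? (⟨b⟩ : PySem.Dict String Int) "pos").getD 0))) i = true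
            then BLANK_PLACEHOLDER
            else String.ofList [(PySem.Str.pyGet? text i).getD ' ']))[i]? = none := by
        apply List.getElem?_eq_none
        rw [List.length_map, PySem.List.length_pyRange_one, hlen]
        omega
      have h2 : (blanks.foldl
          (fun chars b =>
            let p : Int := (PySem.Dict.get? (⟨b⟩ : PySem.Dict String Int) "pos").getD 0
            if 0 ≤ p ∧ p < PySem.Str.len text then chars.set p.toNat BLANK_PLACEHOLDER else chars)
          (text.toList.map (fun c => String.ofList [c])))[i]? = none := by
        apply List.getElem?_eq_none
        rw [bfold_length]
        simpa using Nat.le_of_not_lt him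
      rw [h1, h2]
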